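-- pv_equiv track=rewrite | github.com/Swiddis/Joseki-Scraper | joseki_scrape.py | is_joseki
-- ===== SOURCE A (Python) =====
-- def is_joseki(joseki, min_dists, adding_thresholds):
--     min_dist = min(min_dists)
--     # If a move is equidistant to multiple joseki, it's non-joseki
--     if min_dists.count(min_dist) > 1:
--         return False
--     # If a joseki has at least 20 stones, it can't have anything added
--     idx = min_dists.index(min_dist)
--     if len(joseki[idx]) >= 20:
--         return False
--     # If the move is out of range, it can't be added
--     a = [d for t, d in adding_thresholds if t <= len(joseki[idx])][-1]
--     if min_dist > a:
--         return False
--     # If the move is already in the sequence, assume a ko fight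
--     if min_dist == 0:
--         return False
--     return True
-- ===== SOURCE B (Python) =====
-- def is_joseki(joseki, min_dists, adding_thresholds):
--     # Rank candidate joseki by distance; the ranking's first two entries answer
--     # the "nearest and uniquely nearest?" questions at once.
--     ranked = sorted(range(len(min_dists)), key=lambda i: min_dists[i])
--     nearest = ranked[0]
--     m = min_dists[nearest]
--     if len(ranked) > 1 and min_dists[ranked[1]] == m:
--         return False
--     seq_len = len(joseki[nearest])
--     if seq_len >= 20:
--         return False
--     a = next(d for t, d in reversed(adding_thresholds) if t <= seq_len)
--     return m <= a and m != 0
-- ===== Notes on version B (the rewrite author's own statement) =====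
-- stated objective: alternative
-- what changed: Instead of three scans (min/count/index) over min_dists, B sorts the candidate indices by distance and reads nearest index, minimum and uniqueness off the first two entries of the ranking, and finds the threshold by first match over the reversed threshold list instead of filter-then-[-1]; Pre_ excludes exactly the inputs where A raises (empty min_dists, nearest index outside joseki, no applicable threshold).
import Mathlib
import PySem

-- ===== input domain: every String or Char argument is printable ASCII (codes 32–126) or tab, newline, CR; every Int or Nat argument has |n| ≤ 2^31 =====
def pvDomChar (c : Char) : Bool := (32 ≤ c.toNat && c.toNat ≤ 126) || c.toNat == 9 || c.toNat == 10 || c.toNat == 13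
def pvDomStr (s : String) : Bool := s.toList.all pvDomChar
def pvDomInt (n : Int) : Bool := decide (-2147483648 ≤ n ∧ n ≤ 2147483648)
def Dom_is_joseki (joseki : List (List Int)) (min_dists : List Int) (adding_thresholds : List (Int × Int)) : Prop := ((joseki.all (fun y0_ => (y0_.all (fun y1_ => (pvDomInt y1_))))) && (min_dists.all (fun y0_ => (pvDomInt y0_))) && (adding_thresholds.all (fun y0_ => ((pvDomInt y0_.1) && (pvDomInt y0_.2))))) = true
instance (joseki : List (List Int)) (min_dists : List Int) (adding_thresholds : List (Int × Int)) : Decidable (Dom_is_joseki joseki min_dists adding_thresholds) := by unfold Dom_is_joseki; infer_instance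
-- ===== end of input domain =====

-- B ranks the candidate indices by sorting them on distance and reads the nearest
-- index, the minimum and its uniqueness off the first two entries of the ranking,
-- and finds the threshold by first match over the reversed threshold list
-- (alternative decomposition: a sort replaces A's min/count/index scans).

-- ===== PORT A =====
def is_joseki (joseki : List (List Int)) (min_dists : List Int) (adding_thresholds : List (Int × Int)) : Bool :=
  let min_dist := (PySem.List.min? min_dists (fun x => x)).getD 0
  if PySem.List.count min_dists min_dist > 1 then false
  else
    let idx := (PySem.List.index? min_dists min_dist).getD 0
    let seq := PySem.List.pyGetD joseki (idx : Int) []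
    if seq.length ≥ 20 then false
    else
      let lst := (adding_thresholds.filter (fun td => td.1 ≤ (seq.length : Int))).map (·.2)
      let a := PySem.List.pyGetD lst (-1) 0
      if min_dist > a then false
      else if min_dist = 0 then false
      else true

-- ===== PORT B =====
def is_joseki_alt (joseki : List (List Int)) (min_dists : List Int) (adding_thresholds : List (Int × Int)) : Bool :=
  let ranked := PySem.List.sorted (PySem.List.pyRange 0 (min_dists.length : Int) 1)
                  (fun i => PySem.List.pyGetD min_dists i 0)
  let nearest := PySem.List.pyGetD ranked 0 0       -- ranked[0]; Python raises IndexError on empty min_dists (outside Pre_)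
  let m := PySem.List.pyGetD min_dists nearest 0
  if 1 < ranked.length ∧ PySem.List.pyGetD min_dists (PySem.List.pyGetD ranked 1 0) 0 = m then false
  else
    let seq_len := (PySem.List.pyGetD joseki nearest []).length
    if seq_len ≥ 20 then false
    else
      match adding_thresholds.reverse.find? (fun td => td.1 ≤ (seq_len : Int)) with
      | none => false   -- Python's next(...) raises StopIteration here (outside Pre_)
      | some td => decide (m ≤ td.2 ∧ m ≠ 0)

-- ===== PRECONDITION & SPEC =====
-- Pre_ excludes exactly where Python A raises: empty min_dists (ValueError from min),
-- an index of the unique minimum outside joseki (IndexError), and — when the chosen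
-- sequence is short enough to reach the comprehension — no applicable threshold
-- (IndexError from [][-1]).
def Pre_is_joseki (joseki : List (List Int)) (min_dists : List Int) (adding_thresholds : List (Int × Int)) : Prop :=
  min_dists ≠ [] ∧
  (PySem.List.count min_dists ((PySem.List.min? min_dists (fun x => x)).getD 0) = 1 →
    (PySem.List.index? min_dists ((PySem.List.min? min_dists (fun x => x)).getD 0)).getD 0 < joseki.length ∧
    ((joseki.getD ((PySem.List.index? min_dists ((PySem.List.min? min_dists (fun x => x)).getD 0)).getD 0) []).length < 20 →
      ∃ td ∈ adding_thresholds, td.1 ≤ ((joseki.getD ((PySem.List.index? min_dists ((PySem.List.min? min_dists (fun x => x)).getD 0)).getD 0) []).length : Int)))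
instance (joseki : List (List Int)) (min_dists : List Int) (adding_thresholds : List (Int × Int)) : Decidable (Pre_is_joseki joseki min_dists adding_thresholds) := by unfold Pre_is_joseki; infer_instance

def pvWitness_is_joseki : List (List Int) × List Int × (List (Int × Int)) := ([[1], [2, 3]], [5, 3], [(0, 10)])

def Spec_is_joseki (joseki : List (List Int)) (min_dists : List Int) (adding_thresholds : List (Int × Int)) (out : Bool) : Prop := out = is_joseki_alt joseki min_dists adding_thresholds
instance (joseki : List (List Int)) (min_dists : List Int) (adding_thresholds : List (Int × Int)) (out : Bool) : Decidable (Spec_is_joseki joseki min_dists adding_thresholds out) := by unfold Spec_is_joseki; infer_instance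

-- ===== CLAIM (what is proved, stated in full; the proofs are below) =====
def Claim_equal_is_joseki : Prop := ∀ (joseki : List (List Int)) (min_dists : List Int) (adding_thresholds : List (Int × Int)), Dom_is_joseki joseki min_dists adding_thresholds → Pre_is_joseki joseki min_dists adding_thresholds → Spec_is_joseki joseki min_dists adding_thresholds (is_joseki joseki min_dists adding_thresholds)

-- ===== LEMMAS AND PROOFS =====

-- reading each position of a list back off range(len(l)) reproduces the list
theorem map_getD_range_self (l : List Int) :
    (List.range l.length).map (fun k => l.getD k 0) = l := by
  apply List.ext_getElem (by simp)
  intro i h1 h2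
  simp [List.getD_eq_getElem?_getD, List.getElem?_eq_getElem h2]

-- the ranking is a permutation of the index range, and its keys a permutation of l
theorem ranked_perm_facts (l : List Int) :
    (PySem.List.sorted (PySem.List.pyRange 0 (l.length : Int) 1) (fun i => PySem.List.pyGetD l i 0)).Perm
      ((List.range l.length).map (fun k : Nat => (k : Int))) ∧
    ((PySem.List.sorted (PySem.List.pyRange 0 (l.length : Int) 1) (fun i => PySem.List.pyGetD l i 0)).map
      (fun i => PySem.List.pyGetD l i 0)).Perm l := by
  have hxs := PySem.List.pyRange_zero_natCast l.length
  have hperm : (PySem.List.sorted (PySem.List.pyRange 0 (l.length : Int) 1) (fun i => PySem.List.pyGetD l i 0)).Perm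
      ((List.range l.length).map (fun k : Nat => (k : Int))) := by
    rw [hxs]; exact PySem.List.sorted_perm _ _ _
  refine ⟨hperm, ?_⟩
  have hmapkey : (((List.range l.length).map (fun k : Nat => (k : Int))).map (fun i => PySem.List.pyGetD l i 0)) = l := by
    rw [List.map_map]
    have h2 : ((fun i => PySem.List.pyGetD l i 0) ∘ fun k : Nat => (k : Int)) = fun k : Nat => l.getD k 0 := by
      funext k; simp [PySem.List.pyGetD_natCast]
    rw [h2, map_getD_range_self]
  have h3 := hperm.map (fun i => PySem.List.pyGetD l i 0)
  rw [hmapkey] at h3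
  exact h3

-- facts about the head of the ranking: it is an in-range index and carries the minimum
theorem ranked_head_facts (l : List Int) (r0 : Int) (rest : List Int)
    (hsc : PySem.List.sorted (PySem.List.pyRange 0 (l.length : Int) 1) (fun i => PySem.List.pyGetD l i 0) = r0 :: rest) :
    (∃ k0 : Nat, k0 < l.length ∧ r0 = (k0 : Int)) ∧
    PySem.List.pyGetD l r0 0 ∈ l ∧
    (∀ y ∈ l, PySem.List.pyGetD l r0 0 ≤ y) := by
  obtain ⟨hperm, _⟩ := ranked_perm_facts l
  rw [hsc] at hperm
  have hr0 : ∃ k0 : Nat, k0 < l.length ∧ r0 = (k0 : Int) := by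
    have := hperm.mem_iff.1 (List.mem_cons_self)
    simp only [List.mem_map, List.mem_range] at this
    obtain ⟨k, hk, he⟩ := this
    exact ⟨k, hk, he.symm⟩
  refine ⟨hr0, ?_, ?_⟩
  · obtain ⟨k0, hk0, hr⟩ := hr0
    rw [hr]
    simp only [PySem.List.pyGetD_natCast]
    rw [List.getD_eq_getElem?_getD, List.getElem?_eq_getElem hk0]
    exact List.getElem_mem hk0
  · intro y hy
    obtain ⟨j, hj, hyj⟩ := List.mem_iff_getElem.1 hy
    have hm := PySem.List.key_head_sorted_le _ (fun i => PySem.List.pyGetD l i 0) hsc ((j:Int)) ?_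
    · simp only [PySem.List.pyGetD_natCast] at hm
      rw [List.getD_eq_getElem?_getD, List.getElem?_eq_getElem hj] at hm
      simpa [hyj] using hm
    · rw [PySem.List.pyRange_zero_natCast]
      simp only [List.mem_map, List.mem_range]
      exact ⟨j, hj, rfl⟩

-- when the minimum is unique, the head of the ranking is l.index(min)
theorem ranked_head_unique (l : List Int) (r0 : Int) (rest : List Int) (idx : Nat)
    (hsc : PySem.List.sorted (PySem.List.pyRange 0 (l.length : Int) 1) (fun i => PySem.List.pyGetD l i 0) = r0 :: rest)
    (hc1 : List.count (PySem.List.pyGetD l r0 0) l = 1)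
    (hidx : PySem.List.index? l (PySem.List.pyGetD l r0 0) = some idx) :
    r0 = (idx : Nat) := by
  obtain ⟨hperm, hpermkey⟩ := ranked_perm_facts l
  rw [hsc] at hperm hpermkey
  obtain ⟨hlt, hval, _⟩ := PySem.List.getElem_of_index?_eq_some hidx
  have hmem : (idx : Int) ∈ r0 :: rest := by
    apply hperm.mem_iff.2
    simp only [List.mem_map, List.mem_range]
    exact ⟨idx, hlt, rfl⟩
  rcases List.mem_cons.1 hmem with he | htail
  · exact he.symm
  · exfalso
    have hkeyidx : PySem.List.pyGetD l (idx : Int) 0 = PySem.List.pyGetD l r0 0 := by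
      simp only [PySem.List.pyGetD_natCast]
      rw [List.getD_eq_getElem?_getD, List.getElem?_eq_getElem hlt]
      simpa using hval
    have h2 : 2 ≤ List.count (PySem.List.pyGetD l r0 0) ((r0 :: rest).map (fun i => PySem.List.pyGetD l i 0)) := by
      simp only [List.map_cons]
      rw [List.count_cons_self]
      have hmm : PySem.List.pyGetD l r0 0 ∈ rest.map (fun i => PySem.List.pyGetD l i 0) :=
        List.mem_map.2 ⟨(idx : Int), htail, hkeyidx⟩
      have := List.count_pos_iff.2 hmm
      omega
    rw [hpermkey.count_eq] at h2
    omega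

-- duplicate minimum iff the second entry of the ranking carries the same key
theorem ranked_second_iff (l : List Int) (r0 r1 : Int) (t : List Int)
    (hsc : PySem.List.sorted (PySem.List.pyRange 0 (l.length : Int) 1) (fun i => PySem.List.pyGetD l i 0) = r0 :: r1 :: t) :
    (PySem.List.pyGetD l r1 0 = PySem.List.pyGetD l r0 0 ↔ 1 < List.count (PySem.List.pyGetD l r0 0) l) := by
  obtain ⟨hperm, hpermkey⟩ := ranked_perm_facts l
  rw [hsc] at hperm hpermkey
  obtain ⟨_, _, hmin⟩ := ranked_head_facts l r0 (r1 :: t) hsc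
  have hr1mem : PySem.List.pyGetD l r1 0 ∈ l := by
    have hr1 : r1 ∈ r0 :: r1 :: t := by simp
    have := hperm.mem_iff.1 hr1
    simp only [List.mem_map, List.mem_range] at this
    obtain ⟨k, hk, he⟩ := this
    rw [← he]
    simp only [PySem.List.pyGetD_natCast]
    rw [List.getD_eq_getElem?_getD, List.getElem?_eq_getElem hk]
    exact List.getElem_mem hk
  constructor
  · intro he
    rw [← hpermkey.count_eq]
    simp only [List.map_cons]
    rw [List.count_cons_self]
    have hmm : PySem.List.pyGetD l r0 0 ∈ PySem.List.pyGetD l r1 0 :: t.map (fun i => PySem.List.pyGetD l i 0) := by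
      simp [he]
    have := List.count_pos_iff.2 hmm
    omega
  · intro hcnt
    have h1 : PySem.List.pyGetD l r0 0 ≤ PySem.List.pyGetD l r1 0 := hmin _ hr1mem
    rw [← hpermkey.count_eq] at hcnt
    simp only [List.map_cons, List.count_cons_self] at hcnt
    have hmemtail : PySem.List.pyGetD l r0 0 ∈ PySem.List.pyGetD l r1 0 :: t.map (fun i => PySem.List.pyGetD l i 0) := by
      by_contra hno
      rw [List.count_eq_zero_of_not_mem hno] at hcnt
      omega
    rcases List.mem_cons.1 hmemtail with he | htl
    · exact he.symm
    · obtain ⟨y, hy, hyk⟩ := List.mem_map.1 htl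
      have hpw := PySem.List.sorted_pairwise (PySem.List.pyRange 0 (l.length : Int) 1) (fun i => PySem.List.pyGetD l i 0)
      rw [hsc] at hpw
      have h2 : PySem.List.pyGetD l r1 0 ≤ PySem.List.pyGetD l y 0 := (List.pairwise_cons.1 (List.pairwise_cons.1 hpw).2).1 y hy
      rw [hyk] at h2
      omega

-- B's branch condition holds exactly when the minimum occurs more than once
theorem ranked_dup_iff (l : List Int) (r0 : Int) (rest : List Int)
    (hsc : PySem.List.sorted (PySem.List.pyRange 0 (l.length : Int) 1) (fun i => PySem.List.pyGetD l i 0) = r0 :: rest) :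
    ((1 < (r0 :: rest).length ∧ PySem.List.pyGetD l (PySem.List.pyGetD (r0 :: rest) 1 0) 0 = PySem.List.pyGetD l r0 0)
      ↔ 1 < List.count (PySem.List.pyGetD l r0 0) l) := by
  rcases rest with _ | ⟨r1, t⟩
  · obtain ⟨hperm, _⟩ := ranked_perm_facts l
    rw [hsc] at hperm
    have hn1 : l.length = 1 := by
      have := hperm.length_eq; simpa using this.symm
    have hcle := List.count_le_length (l := l) (a := PySem.List.pyGetD l r0 0)
    simp only [List.length_cons, List.length_nil]
    constructor
    · rintro ⟨h, _⟩; omega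
    · intro h; omega
  · have h1 : PySem.List.pyGetD (r0 :: r1 :: t) 1 0 = r1 := by
      simp [pysem]
    rw [h1]
    constructor
    · rintro ⟨_, he⟩; exact (ranked_second_iff l r0 r1 t hsc).1 he
    · intro h; exact ⟨by simp, (ranked_second_iff l r0 r1 t hsc).2 h⟩

-- the agreement of the two tails once the chosen sequence is fixed
theorem tail_eq (ats : List (Int × Int)) (m : Int) (seq : List Int)
    (hthr : seq.length < 20 → ∃ td ∈ ats, td.1 ≤ (seq.length : Int)) :
    (if seq.length ≥ 20 then false
     else
       if m > PySem.List.pyGetD ((ats.filter (fun td => td.1 ≤ (seq.length : Int))).map (·.2)) (-1) 0 then false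
       else if m = 0 then false else true) =
    (if seq.length ≥ 20 then false
     else match ats.reverse.find? (fun td => td.1 ≤ (seq.length : Int)) with
       | none => false
       | some td => decide (m ≤ td.2 ∧ m ≠ 0)) := by
  by_cases h20 : seq.length ≥ 20
  · rw [if_pos h20, if_pos h20]
  · rw [if_neg h20, if_neg h20]
    obtain ⟨td0, htd0, hle0⟩ := hthr (by omega)
    have hfne : ats.filter (fun td => td.1 ≤ (seq.length : Int)) ≠ [] := by
      simp only [ne_eq, List.filter_eq_nil_iff, not_forall]
      exact ⟨td0, htd0, by simpa using hle0⟩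
    rcases hgl : (ats.filter (fun td => td.1 ≤ (seq.length : Int))).getLast? with _ | td
    · exact absurd (List.getLast?_eq_none_iff.1 hgl) hfne
    · have hfind : ats.reverse.find? (fun td => td.1 ≤ (seq.length : Int)) = some td := by
        rw [← List.getLast?_filter]; exact hgl
      rw [hfind]
      have hmapne : (ats.filter (fun td => td.1 ≤ (seq.length : Int))).map (·.2) ≠ [] := by
        simpa using hfne
      rw [PySem.List.pyGetD_neg_one _ 0 hmapne]
      have hlast : ((ats.filter (fun td => td.1 ≤ (seq.length : Int))).map (·.2)).getLast hmapne = td.2 := by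
        rw [← Option.some_inj, ← List.getLast?_eq_some_getLast]
        rw [List.getLast?_map, hgl]; rfl
      rw [hlast]
      by_cases h1 : m > td.2
      · rw [if_pos h1]; simp; omega
      · rw [if_neg h1]
        by_cases h2 : m = 0
        · rw [if_pos h2]; simp [h2]
        · rw [if_neg h2]; simp [h2]; omega

-- ===== VERDICT (by name: the statement is the Claim_ definition above) =====
theorem is_joseki_spec : Claim_equal_is_joseki := by
  intro joseki min_dists ats _ hpre
  obtain ⟨hne, hrest⟩ := hpre
  unfold Spec_is_joseki
  rcases hsc : PySem.List.sorted (PySem.List.pyRange 0 (min_dists.length : Int) 1) (fun i => PySem.List.pyGetD min_dists i 0) with _ | ⟨r0, rest⟩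
  · exfalso
    obtain ⟨hperm, _⟩ := ranked_perm_facts min_dists
    rw [hsc] at hperm
    have hl := hperm.length_eq
    simp at hl
    exact hne (List.length_eq_zero_iff.1 hl.symm)
  · obtain ⟨⟨k0, hk0, hr0⟩, hmem0, hmin0⟩ := ranked_head_facts _ _ _ hsc
    have hminA : PySem.List.min? min_dists (fun x => x) = some (PySem.List.pyGetD min_dists r0 0) := by
      rcases hA : PySem.List.min? min_dists (fun x => x) with _ | mA
      · exact absurd ((PySem.List.min?_eq_none_iff _ _).1 hA) hne
      · exact congrArg some (le_antisymm (PySem.List.min?_id_le hA _ hmem0) (hmin0 mA (PySem.List.min?_mem hA)))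
    have hcountpos : 0 < List.count (PySem.List.pyGetD min_dists r0 0) min_dists :=
      List.count_pos_iff.2 hmem0
    rw [hminA] at hrest
    simp only [Option.getD_some, PySem.List.count_eq] at hrest
    unfold is_joseki is_joseki_alt
    simp only [hminA, Option.getD_some, hsc, PySem.List.pyGetD_zero_cons]
    by_cases hdup : 1 < List.count (PySem.List.pyGetD min_dists r0 0) min_dists
    · rw [if_pos (by rw [PySem.List.count_eq]; omega),
          if_pos ((ranked_dup_iff min_dists r0 rest hsc).2 hdup)]
    · rw [if_neg (by rw [PySem.List.count_eq]; omega),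
          if_neg (fun h => hdup ((ranked_dup_iff min_dists r0 rest hsc).1 h))]
      have hc1 : List.count (PySem.List.pyGetD min_dists r0 0) min_dists = 1 := by omega
      have hs : (PySem.List.index? min_dists (PySem.List.pyGetD min_dists r0 0)).isSome :=
        (PySem.List.index?_isSome_iff _ _).2 hmem0
      obtain ⟨idx, hidx⟩ := Option.isSome_iff_exists.1 hs
      have hridx : r0 = (idx : Int) := ranked_head_unique _ _ _ _ hsc hc1 hidx
      rw [hidx] at hrest
      simp only [Option.getD_some] at hrest
      obtain ⟨hlt, hthr⟩ := hrest hc1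
      rw [hidx, hridx]
      simp only [Option.getD_some, PySem.List.pyGetD_natCast]
      exact tail_eq ats _ _ hthr
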